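-- pv_equiv track=rewrite | github.com/jaredkoontz/leetcode_py | 2235_add_two_numbers_lol/test_add_two_numbers_lol.py | dijkstra_sum
-- ===== SOURCE A (Python) =====
-- import heapq
--
-- def dijkstra_sum(num1: int, num2: int) -> int:
--     """Using Dijkstra's shortest path algorithm."""
--
--     def _dfs(dest: int, source: int, adj: list[list[tuple]], dis: list[int]) -> int:
--         """Helper function for Dijkstra's algorithm."""
--         dis[source] = 0
--         pq = [(0, source)]
--         while pq:
--             cur_dist, cur_node = heapq.heappop(pq)
--             dis[cur_node] = cur_dist
--             for neighbor, weight in adj[cur_node]: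
--                 if cur_dist + weight < dis[neighbor]:
--                     heapq.heappush(pq, (cur_dist + weight, neighbor))
--         return dis[dest]
--
--     adj = [[] for _ in range(3)]
--     dis = [float("inf")] * 3
--     adj[0].append((1, num1))
--     adj[1].append((2, num2))
--     return _dfs(2, 0, adj, dis)
-- ===== SOURCE B (Python) =====
-- def dijkstra_sum(num1: int, num2: int) -> int:
--     """The shortest path over the fixed chain 0 --num1--> 1 --num2--> 2 is just num1 + num2."""
--     return num1 + num2
-- ===== Notes on version B (the rewrite author's own statement) =====
-- stated objective: faster
-- what changed: The fixed 3-node chain graph makes Dijkstra's answer exactly num1+num2, so B returns the sum directly instead of building adjacency lists and running a heap-based search.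
import Mathlib
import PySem

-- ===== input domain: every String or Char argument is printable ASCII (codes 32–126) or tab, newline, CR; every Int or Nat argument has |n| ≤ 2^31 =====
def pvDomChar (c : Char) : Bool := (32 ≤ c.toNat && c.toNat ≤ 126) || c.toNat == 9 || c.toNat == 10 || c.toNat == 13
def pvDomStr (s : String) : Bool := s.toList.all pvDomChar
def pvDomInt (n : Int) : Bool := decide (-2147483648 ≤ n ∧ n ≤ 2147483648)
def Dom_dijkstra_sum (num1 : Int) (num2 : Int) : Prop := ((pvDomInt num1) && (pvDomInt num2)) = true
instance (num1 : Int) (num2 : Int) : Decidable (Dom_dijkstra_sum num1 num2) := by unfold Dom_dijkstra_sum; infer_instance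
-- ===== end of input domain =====

-- B replaces A's heap-based Dijkstra over the fixed 3-node chain by the direct sum num1 + num2 (constant-factor speed-up).

-- ===== PORT A =====
-- dis is List (Option Int): none models float("inf"); the only comparison Python
-- makes against inf is `int < inf` = True, modeled by pvLtOpt _ none = true.
def pvLtOpt (x : Int) : Option Int → Bool
  | none => true
  | some y => decide (x < y)

-- heapq.heappop: removes and returns the smallest tuple (lexicographic order), exact.
def pvPopMin : List (Int × Int) → Option ((Int × Int) × List (Int × Int))
  | [] => none
  | x :: xs =>
    match pvPopMin xs with
    | none => some (x, [])
    | some (m, rest) =>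
      if x.1 < m.1 ∨ (x.1 = m.1 ∧ x.2 ≤ m.2) then some (x, xs) else some (m, x :: rest)

-- the `while pq:` loop of _dfs, with fuel making it total; node indices here are the
-- literals 0,1,2 pushed by the code, so .toNat indexing is exact.
def pvDfsLoop : Nat → List (Int × Int) → List (Option Int) → List (List (Int × Int)) → List (Option Int)
  | 0, _, dis, _ => dis
  | fuel + 1, pq, dis, adj =>
    match pvPopMin pq with
    | none => dis
    | some ((curDist, curNode), rest) =>
      let dis' := dis.set curNode.toNat (some curDist)
      let pq' := (adj.getD curNode.toNat []).foldl
        (fun acc nw =>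
          if pvLtOpt (curDist + nw.2) (dis'.getD nw.1.toNat none) then
            acc ++ [(curDist + nw.2, nw.1)]
          else acc) rest
      pvDfsLoop fuel pq' dis' adj

def dijkstra_sum (num1 : Int) (num2 : Int) : Int :=
  -- adj after the appends; dis = [inf, inf, inf]; _dfs(2, 0, adj, dis)
  let adj : List (List (Int × Int)) := [[(1, num1)], [(2, num2)], []]
  let dis : List (Option Int) := [none, none, none]
  let dis₀ := dis.set 0 (some 0)            -- dis[source] = 0
  let final := pvDfsLoop 8 [(0, 0)] dis₀ adj -- the loop runs exactly 3 iterations; fuel 8 is ample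
  match final.getD 2 none with
  | some v => v
  | none => 0   -- unreachable: dis[2] is always set by the loop

-- ===== PORT B =====
def dijkstra_sum_alt (num1 : Int) (num2 : Int) : Int := num1 + num2

-- ===== PRECONDITION & SPEC =====
def Spec_dijkstra_sum (num1 : Int) (num2 : Int) (out : Int) : Prop := out = dijkstra_sum_alt num1 num2
instance (num1 : Int) (num2 : Int) (out : Int) : Decidable (Spec_dijkstra_sum num1 num2 out) := by unfold Spec_dijkstra_sum; infer_instance

-- ===== CLAIM (what is proved, stated in full; the proofs are below) =====
def Claim_equal_dijkstra_sum : Prop := ∀ (num1 : Int) (num2 : Int), Dom_dijkstra_sum num1 num2 → Spec_dijkstra_sum num1 num2 (dijkstra_sum num1 num2)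

-- ===== LEMMAS AND PROOFS =====

-- ===== VERDICT (by name: the statement is the Claim_ definition above) =====
theorem dijkstra_sum_spec : Claim_equal_dijkstra_sum := by
  intro num1 num2 _
  show dijkstra_sum num1 num2 = dijkstra_sum_alt num1 num2
  simp [dijkstra_sum, dijkstra_sum_alt, pvDfsLoop, pvPopMin, pvLtOpt, List.set, List.getD,
        List.foldl]
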